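-- pv_equiv track=rewrite | github.com/nickchen111/Advent_Of_Code_2024 | aoc_14.py | check
-- ===== SOURCE A (Python) =====
-- def check(matrix) -> bool:
--     """
--     檢查是否存在連續5個機器人的水平或垂直圖案。
--     """
--     for row in matrix:
--         cnt = 0
--         for cell in row:
--             if cell > 0:
--                 cnt += 1
--                 if cnt >= 5:
--                     return True
--             else:
--                 cnt = 0
--     return False
-- ===== SOURCE B (Python) =====
-- def check(matrix) -> bool:
--     return any('11111' in ''.join('1' if cell > 0 else '0' for cell in row)
--                for row in matrix)
-- ===== Notes on version B (the rewrite author's own statement) =====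
-- stated objective: idiomatic
-- what changed: Each row's positivity is rendered as a 0/1 string and a substring search for '11111' replaces the hand-maintained running counter with early return.
import Mathlib
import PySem

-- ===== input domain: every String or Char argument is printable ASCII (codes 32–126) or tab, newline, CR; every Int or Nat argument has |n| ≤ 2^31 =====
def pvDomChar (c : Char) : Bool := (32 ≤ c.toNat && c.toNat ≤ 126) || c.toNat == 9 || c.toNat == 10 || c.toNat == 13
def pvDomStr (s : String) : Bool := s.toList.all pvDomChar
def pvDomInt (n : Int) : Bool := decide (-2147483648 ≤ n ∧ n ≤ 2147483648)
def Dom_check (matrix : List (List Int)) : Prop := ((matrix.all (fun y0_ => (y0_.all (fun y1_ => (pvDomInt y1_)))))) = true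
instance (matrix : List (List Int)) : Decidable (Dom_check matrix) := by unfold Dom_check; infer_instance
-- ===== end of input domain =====

-- B replaces A's running counter with a per-row 0/1 rendering searched for the substring '11111' (idiomatic; same cost).


-- ===== PORT A =====
-- inner loop: running counter cnt over the cells of one row, early return on cnt ≥ 5
def checkRow : Int → List Int → Bool
  | _, [] => false
  | cnt, cell :: rest =>
    if cell > 0 then
      if cnt + 1 ≥ 5 then true else checkRow (cnt + 1) rest
    else
      checkRow 0 rest

def check : List (List Int) → Bool
  | [] => false
  | row :: rest => if checkRow 0 row then true else check rest

-- ===== PORT B =====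
-- ''.join('1' if cell > 0 else '0' for cell in row)
def pvBits (row : List Int) : List Char := row.map (fun cell => if cell > 0 then '1' else '0')

-- Python's substring test `'11111' in s` → PySem.Chars.isIn on the char list (exact)
def check_alt (matrix : List (List Int)) : Bool :=
  matrix.any (fun row => PySem.Chars.isIn ("11111".toList) (pvBits row))

-- ===== PRECONDITION & SPEC =====
def Spec_check (matrix : List (List Int)) (out : Bool) : Prop := out = check_alt matrix
instance (matrix : List (List Int)) (out : Bool) : Decidable (Spec_check matrix out) := by unfold Spec_check; infer_instance

-- ===== CLAIM (what is proved, stated in full; the proofs are below) =====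
def Claim_equal_check : Prop := ∀ (matrix : List (List Int)), Dom_check matrix → Spec_check matrix (check matrix)

-- ===== LEMMAS AND PROOFS =====

theorem replicate_prefix_mono {α : Type} {x : α} {L : List α} {m n : Nat} (h : m ≤ n)
    (hp : List.replicate n x <+: L) : List.replicate m x <+: L := by
  refine List.IsPrefix.trans ?_ hp
  exact ⟨List.replicate (n - m) x, by rw [← List.replicate_add]; congr 1; omega⟩

theorem prefix_repl_cons (k : Nat) (L : List Char) :
    (List.replicate (k + 1) '1' <+: '1' :: L) ↔ List.replicate k '1' <+: L := by
  simp [List.replicate_succ, List.cons_prefix_cons]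

theorem infix5_cons_one (L : List Char) :
    (List.replicate 5 '1' <:+: '1' :: L) ↔
      (List.replicate 4 '1' <+: L ∨ List.replicate 5 '1' <:+: L) := by
  rw [List.infix_cons_iff, show (5 : Nat) = 4 + 1 from rfl, prefix_repl_cons]

theorem not_prefix_repl_cons_zero (k : Nat) (hk : k ≠ 0) (L : List Char) :
    ¬ (List.replicate k '1' <+: '0' :: L) := by
  intro h
  rcases Nat.exists_eq_succ_of_ne_zero hk with ⟨j, hj⟩
  rw [hj, List.replicate_succ, List.cons_prefix_cons] at h
  exact absurd h.1 (by decide)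

theorem checkRow_iff (r : List Int) : ∀ (cnt : Int), 0 ≤ cnt → cnt < 5 →
    (checkRow cnt r = true ↔
      (List.replicate (5 - cnt.toNat) '1' <+: pvBits r ∨ List.replicate 5 '1' <:+: pvBits r)) := by
  induction r with
  | nil =>
    intro cnt h0 h5
    have : 5 - cnt.toNat ≠ 0 := by omega
    simp [checkRow, pvBits, List.prefix_nil, List.replicate_eq_nil_iff, this]
  | cons c rest ih =>
    intro cnt h0 h5
    by_cases hc : c > 0
    · by_cases hbig : cnt + 1 ≥ 5
      · have hcnt : cnt.toNat = 4 := by omega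
        have hL : checkRow cnt (c :: rest) = true := by simp [checkRow, hc, hbig]
        simp [hL, pvBits, hc, hcnt, List.replicate_succ, List.cons_prefix_cons]
      · have hrec := ih (cnt + 1) (by omega) (by omega)
        have hL : checkRow cnt (c :: rest) = checkRow (cnt + 1) rest := by
          simp [checkRow, hc, hbig]
        have hm : 5 - cnt.toNat = (5 - (cnt + 1).toNat) + 1 := by omega
        have h4 : (5 - (cnt + 1).toNat) ≤ 4 := by omega
        have hbits : pvBits (c :: rest) = '1' :: pvBits rest := by simp [pvBits, hc]
        rw [hL, hrec, hbits, hm, prefix_repl_cons, infix5_cons_one]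
        constructor
        · rintro (h | h)
          · exact Or.inl h
          · exact Or.inr (Or.inr h)
        · rintro (h | h | h)
          · exact Or.inl h
          · exact Or.inl (replicate_prefix_mono h4 h)
          · exact Or.inr h
    · have hrec := ih 0 le_rfl (by omega)
      have hne : 5 - cnt.toNat ≠ 0 := by omega
      have hL : checkRow cnt (c :: rest) = checkRow 0 rest := by simp [checkRow, hc]
      have hbits : pvBits (c :: rest) = '0' :: pvBits rest := by simp [pvBits, hc]
      rw [hL, hrec, hbits, List.infix_cons_iff]
      constructor
      · rintro (h | h)
        · exact Or.inr (Or.inr (List.IsPrefix.isInfix (by simpa using h)))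
        · exact Or.inr (Or.inr h)
      · rintro (h | h | h)
        · exact absurd h (not_prefix_repl_cons_zero _ hne _)
        · exact absurd h (not_prefix_repl_cons_zero 5 (by decide) _)
        · exact Or.inr h

theorem checkRow_zero (row : List Int) :
    checkRow 0 row = PySem.Chars.isIn ("11111".toList) (pvBits row) := by
  have h := checkRow_iff row 0 le_rfl (by decide)
  have hs : "11111".toList = List.replicate 5 '1' := by decide
  rw [hs]
  cases hb : checkRow 0 row
  · symm
    rw [PySem.Chars.isIn_eq_false_iff]
    intro hinf
    have := h.mpr (Or.inr hinf)
    simp [hb] at this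
  · symm
    rw [PySem.Chars.isIn_iff_infix]
    rcases h.mp hb with hp | hi
    · exact List.IsPrefix.isInfix (by simpa using hp)
    · exact hi

-- ===== VERDICT (by name: the statement is the Claim_ definition above) =====
theorem check_spec : Claim_equal_check := by
  unfold Claim_equal_check Spec_check
  intro matrix
  induction matrix with
  | nil => intro _; rfl
  | cons row rest ih =>
    intro hdom
    have hd : Dom_check rest := by
      simp only [Dom_check, List.all_cons, Bool.and_eq_true] at hdom ⊢
      exact hdom.2
    have h1 : check (row :: rest) = if checkRow 0 row then true else check rest := rfl
    have h2 : check_alt (row :: rest)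
        = (PySem.Chars.isIn ("11111".toList) (pvBits row) || check_alt rest) := by
      simp [check_alt]
    rw [h1, h2, ← checkRow_zero, ih hd]
    cases checkRow 0 row <;> simp
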